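-- pv_equiv track=rewrite | github.com/molly5617/NTU-CV | HW10/HW10.py | my_conv
-- ===== SOURCE A (Python) =====
-- def my_conv(lena,mask,theshold):
--     m=len(lena)-len(mask)+1
--     n=len(lena[0])-len(mask[0])+1
--     mk=len(mask)
--     nk=len(mask[0])
--     res=[[0]*n for _ in range(m)]
--     for i in range(m):
--         for j in range(n):
--             tmp=0
--             for k in range(mk):
--                 for l in range(nk):
--                     tmp+=mask[k][l]*lena[i+k][j+l]
--             if tmp>=theshold:
--                 res[i][j]=1
--             elif tmp<=-theshold:
--                 res[i][j]=-1
--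
--     return res
-- ===== SOURCE B (Python) =====
-- def my_conv(lena, mask, theshold):
--     mk = len(mask)
--     nk = len(mask[0])
--     m = len(lena) - mk + 1
--     n = len(lena[0]) - nk + 1
--     # pass 1: scatter each mask weight across the whole image, rebuilding the
--     # accumulator grid by comprehension (mask-first loop order)
--     acc = [[0] * n for _ in range(m)]
--     for k in range(mk):
--         for l in range(nk):
--             acc = [[a + mask[k][l] * lena[i + k][j + l] for j, a in enumerate(row)]
--                    for i, row in enumerate(acc)]
--     # pass 2: threshold the accumulated sums
--     return [[1 if t >= theshold else (-1 if t <= -theshold else 0) for t in row]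
--             for row in acc]
-- ===== Notes on version B (the rewrite author's own statement) =====
-- stated objective: alternative
-- what changed: Inverted the loop nesting: B scatters each mask weight over the whole image in a mask-first pass that rebuilds the accumulator grid by comprehension, then thresholds all accumulated sums in a separate second pass, instead of A's per-output-cell gather with in-place writes.
import Mathlib
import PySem

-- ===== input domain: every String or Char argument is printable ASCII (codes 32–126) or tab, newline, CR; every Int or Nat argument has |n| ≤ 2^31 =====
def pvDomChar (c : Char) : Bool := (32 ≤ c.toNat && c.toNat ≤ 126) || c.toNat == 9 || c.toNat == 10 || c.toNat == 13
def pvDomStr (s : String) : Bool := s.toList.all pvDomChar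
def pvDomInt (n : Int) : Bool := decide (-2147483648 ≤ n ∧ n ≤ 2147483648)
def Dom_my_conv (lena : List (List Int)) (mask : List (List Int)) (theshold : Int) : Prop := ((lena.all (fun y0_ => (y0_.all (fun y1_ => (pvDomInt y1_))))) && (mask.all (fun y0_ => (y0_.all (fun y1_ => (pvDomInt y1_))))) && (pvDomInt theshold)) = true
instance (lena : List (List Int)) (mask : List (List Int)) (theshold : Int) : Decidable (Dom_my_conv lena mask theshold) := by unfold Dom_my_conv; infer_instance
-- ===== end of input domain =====

-- B inverts the loop nesting: a mask-first scatter pass rebuilding the accumulator grid by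
-- comprehension, then a separate threshold pass, instead of A's per-cell gather with in-place writes.


-- ===== PORT A =====
-- literal port of A: per output cell (i,j) gather tmp over the mask, then write 1 / -1 in place.
-- List indexing is ported with getD: under Pre_ every index read is in range (outside Pre_ Python
-- raises IndexError, and those inputs are excluded by Pre_).
def my_conv (lena : List (List Int)) (mask : List (List Int)) (theshold : Int) : List (List Int) :=
  let m : Nat := ((lena.length : Int) - (mask.length : Int) + 1).toNat
  let n : Nat := (((lena.headD []).length : Int) - ((mask.headD []).length : Int) + 1).toNat
  let mk : Nat := mask.length
  let nk : Nat := (mask.headD []).length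
  let res : List (List Int) := List.replicate m (List.replicate n 0)
  (List.range m).foldl (fun res i =>
    (List.range n).foldl (fun res j =>
      let tmp : Int := (List.range mk).foldl (fun tmp k =>
        (List.range nk).foldl (fun tmp l =>
          tmp + ((mask.getD k []).getD l 0) * ((lena.getD (i + k) []).getD (j + l) 0)) tmp) 0
      if theshold ≤ tmp then res.set i ((res.getD i []).set j 1)
      else if tmp ≤ -theshold then res.set i ((res.getD i []).set j (-1))
      else res) res) res

-- ===== PORT B =====
-- literal port of B: mask-first scatter rebuilding the grid (zipIdx = Python enumerate),
-- then one threshold pass over the accumulated sums.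
def my_conv_alt (lena : List (List Int)) (mask : List (List Int)) (theshold : Int) : List (List Int) :=
  let mk : Nat := mask.length
  let nk : Nat := (mask.headD []).length
  let m : Nat := ((lena.length : Int) - (mk : Int) + 1).toNat
  let n : Nat := (((lena.headD []).length : Int) - (nk : Int) + 1).toNat
  let acc0 : List (List Int) := List.replicate m (List.replicate n 0)
  let acc : List (List Int) := (List.range mk).foldl (fun acc k =>
    (List.range nk).foldl (fun acc l =>
      acc.zipIdx.map (fun p =>
        p.1.zipIdx.map (fun q =>
          q.1 + ((mask.getD k []).getD l 0) * ((lena.getD (p.2 + k) []).getD (q.2 + l) 0)))) acc) acc0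
  acc.map (fun row => row.map (fun t =>
    if theshold ≤ t then (1 : Int) else if t ≤ -theshold then -1 else 0))

-- ===== PRECONDITION & SPEC =====
-- Pre_ is exactly the set of inputs on which Python A returns (no IndexError): lena and mask
-- nonempty, and when the output grid is nonempty and the mask has at least one column (so the
-- inner gather loop actually indexes), every mask row reaches len(mask[0]) and every lena row
-- reaches len(lena[0]). Only inputs on which A raises are excluded.
def Pre_my_conv (lena : List (List Int)) (mask : List (List Int)) (theshold : Int) : Prop :=
  lena ≠ [] ∧ mask ≠ [] ∧
  (mask.length ≤ lena.length →
   (mask.headD []).length ≤ (lena.headD []).length →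
   1 ≤ (mask.headD []).length →
    (∀ r ∈ mask, (mask.headD []).length ≤ r.length) ∧
    (∀ r ∈ lena, (lena.headD []).length ≤ r.length))
instance (lena : List (List Int)) (mask : List (List Int)) (theshold : Int) : Decidable (Pre_my_conv lena mask theshold) := by unfold Pre_my_conv; infer_instance

def pvWitness_my_conv : List (List Int) × List (List Int) × Int := ([[1, 2], [3, 4]], [[1]], 3)

def Spec_my_conv (lena : List (List Int)) (mask : List (List Int)) (theshold : Int) (out : List (List Int)) : Prop := out = my_conv_alt lena mask theshold
instance (lena : List (List Int)) (mask : List (List Int)) (theshold : Int) (out : List (List Int)) : Decidable (Spec_my_conv lena mask theshold out) := by unfold Spec_my_conv; infer_instance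

-- ===== CLAIM (what is proved, stated in full; the proofs are below) =====
def Claim_equal_my_conv : Prop := ∀ (lena : List (List Int)) (mask : List (List Int)) (theshold : Int), Dom_my_conv lena mask theshold → Pre_my_conv lena mask theshold → Spec_my_conv lena mask theshold (my_conv lena mask theshold)

-- ===== LEMMAS AND PROOFS =====

-- zipIdx of an indexed map is the indexed map of pairs (Python enumerate over a built row).
theorem pv_zipIdx_range_map {α : Type} (m : Nat) (g : Nat → α) :
    ((List.range m).map g).zipIdx = (List.range m).map (fun i => (g i, i)) := by
  apply List.ext_getElem <;> simp

-- one scatter step (fixed mask entry) maps a grid in map-form to map-form, cell-wise.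
theorem pv_scatter_step (m n : Nat) (f : Nat → Nat → Int) (c : Nat → Nat → Int) :
    ((List.range m).map (fun i => (List.range n).map (f i))).zipIdx.map
      (fun p => p.1.zipIdx.map (fun q => q.1 + c p.2 q.2))
    = (List.range m).map (fun i => (List.range n).map (fun j => f i j + c i j)) := by
  rw [pv_zipIdx_range_map]
  simp only [List.map_map]
  apply List.map_congr_left
  intro i _
  simp only [Function.comp]
  rw [pv_zipIdx_range_map]
  simp [List.map_map, Function.comp]

-- the inner scatter loop (over l) accumulates cell-wise.
theorem pv_scatter_inner (m n : Nat) (c : Nat → Nat → Nat → Int) (f : Nat → Nat → Int) (nk : Nat) :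
    (List.range nk).foldl
      (fun acc l => acc.zipIdx.map (fun p => p.1.zipIdx.map (fun q => q.1 + c l p.2 q.2)))
      ((List.range m).map (fun i => (List.range n).map (f i)))
    = (List.range m).map (fun i => (List.range n).map (fun j =>
        (List.range nk).foldl (fun t l => t + c l i j) (f i j))) := by
  induction nk with
  | zero => simp
  | succ nk ih =>
    rw [List.range_succ, List.foldl_append]
    simp only [List.foldl_cons, List.foldl_nil]
    rw [ih, pv_scatter_step]
    simp only [List.foldl_append, List.foldl_cons, List.foldl_nil]

-- the full scatter double loop (over k, then l) accumulates cell-wise.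
theorem pv_scatter_outer (m n : Nat) (c2 : Nat → Nat → Nat → Nat → Int) (f : Nat → Nat → Int)
    (mk nk : Nat) :
    (List.range mk).foldl (fun acc k =>
      (List.range nk).foldl
        (fun acc l => acc.zipIdx.map (fun p => p.1.zipIdx.map (fun q => q.1 + c2 k l p.2 q.2)))
        acc)
      ((List.range m).map (fun i => (List.range n).map (f i)))
    = (List.range m).map (fun i => (List.range n).map (fun j =>
        (List.range mk).foldl (fun t k =>
          (List.range nk).foldl (fun t l => t + c2 k l i j) t) (f i j))) := by
  induction mk with
  | zero => simp
  | succ mk ih =>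
    rw [List.range_succ, List.foldl_append]
    simp only [List.foldl_cons, List.foldl_nil]
    rw [ih, pv_scatter_inner]
    simp only [List.foldl_append, List.foldl_cons, List.foldl_nil]

-- A's inner loop only touches row i: it factors through a fold on that row.
theorem pv_row_factor (th : Int) (g : Nat → Int) (i : Nat) :
    ∀ (js : List Nat) (res : List (List Int)), i < res.length →
    js.foldl (fun res j =>
        if th ≤ g j then res.set i ((res.getD i []).set j 1)
        else if g j ≤ -th then res.set i ((res.getD i []).set j (-1))
        else res) res
    = res.set i (js.foldl (fun row j =>
        if th ≤ g j then row.set j 1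
        else if g j ≤ -th then row.set j (-1)
        else row) (res.getD i [])) := by
  intro js
  induction js with
  | nil =>
    intro res h
    simp only [List.foldl_nil]
    rw [List.getD_eq_getElem _ _ h, List.set_getElem_self]
  | cons j js ih =>
    intro res h
    simp only [List.foldl_cons]
    split_ifs with h1 h2
    · rw [ih _ (by simpa using h)]
      have hg : (res.set i ((res.getD i []).set j 1)).getD i [] = (res.getD i []).set j 1 := by
        simp only [List.getD]
        rw [List.getElem?_set_self (by simpa using h)]
        rfl
      rw [hg, List.set_set]
    · rw [ih _ (by simpa using h)]
      have hg : (res.set i ((res.getD i []).set j (-1))).getD i [] = (res.getD i []).set j (-1) := by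
        simp only [List.getD]
        rw [List.getElem?_set_self (by simpa using h)]
        rfl
      rw [hg, List.set_set]
    · exact ih _ h

-- A's row loop over range n from a zero row of length N ≥ n yields the thresholded row.
theorem pv_row_fold (th : Int) (g : Nat → Int) :
    ∀ (n N : Nat), n ≤ N →
    (List.range n).foldl (fun row j =>
        if th ≤ g j then row.set j 1
        else if g j ≤ -th then row.set j (-1)
        else row) (List.replicate N (0 : Int))
    = (List.range n).map (fun j => if th ≤ g j then (1 : Int) else if g j ≤ -th then -1 else 0)
        ++ List.replicate (N - n) 0 := by
  intro n
  induction n with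
  | zero => simp
  | succ n ih =>
    intro N hN
    rw [List.range_succ, List.foldl_append, List.map_append]
    simp only [List.foldl_cons, List.foldl_nil, List.map_cons, List.map_nil]
    rw [ih N (by omega)]
    set mp := (List.range n).map
      (fun j => if th ≤ g j then (1 : Int) else if g j ≤ -th then -1 else 0) with hmp
    have hlen : mp.length = n := by simp [hmp]
    have hrep : List.replicate (N - n) (0 : Int) = 0 :: List.replicate (N - (n + 1)) 0 := by
      rw [show N - n = (N - (n + 1)) + 1 by omega, List.replicate_succ]
    split_ifs with h1 h2
    · rw [List.set_append_right _ _ (by omega), hlen, Nat.sub_self, hrep]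
      simp
    · rw [List.set_append_right _ _ (by omega), hlen, Nat.sub_self, hrep]
      simp
    · rw [hrep]
      simp

-- A's outer loop over range m from a zero grid of M ≥ m rows yields the thresholded grid.
theorem pv_outer_fold (th : Int) (g : Nat → Nat → Int) (n : Nat) :
    ∀ (m M : Nat), m ≤ M →
    (List.range m).foldl (fun res i =>
      (List.range n).foldl (fun res j =>
        if th ≤ g i j then res.set i ((res.getD i []).set j 1)
        else if g i j ≤ -th then res.set i ((res.getD i []).set j (-1))
        else res) res) (List.replicate M (List.replicate n (0 : Int)))
    = (List.range m).map (fun i => (List.range n).map (fun j =>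
        if th ≤ g i j then (1 : Int) else if g i j ≤ -th then -1 else 0))
        ++ List.replicate (M - m) (List.replicate n 0) := by
  intro m
  induction m with
  | zero => simp
  | succ m ih =>
    intro M hM
    rw [List.range_succ, List.foldl_append, List.map_append]
    simp only [List.foldl_cons, List.foldl_nil, List.map_cons, List.map_nil]
    rw [ih M (by omega)]
    set mp := (List.range m).map (fun i => (List.range n).map (fun j =>
      if th ≤ g i j then (1 : Int) else if g i j ≤ -th then -1 else 0)) with hmp
    have hlen : mp.length = m := by simp [hmp]
    have hrep : List.replicate (M - m) (List.replicate n (0 : Int))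
        = List.replicate n 0 :: List.replicate (M - (m + 1)) (List.replicate n 0) := by
      rw [show M - m = (M - (m + 1)) + 1 by omega, List.replicate_succ]
    have hget : (mp ++ List.replicate (M - m) (List.replicate n (0 : Int))).getD m []
        = List.replicate n 0 := by
      simp only [List.getD]
      rw [List.getElem?_append_right (by omega), hlen, Nat.sub_self, hrep]
      rfl
    rw [pv_row_factor th (g m) m _ _
      (by rw [List.length_append, hlen, List.length_replicate]; omega)]
    rw [hget, pv_row_fold th (g m) n n (le_refl n)]
    simp only [Nat.sub_self, List.replicate_zero, List.append_nil]
    rw [List.set_append_right _ _ (by omega), hlen, Nat.sub_self, hrep]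
    simp

theorem pv_ports_eq (lena mask : List (List Int)) (theshold : Int) :
    my_conv lena mask theshold = my_conv_alt lena mask theshold := by
  unfold my_conv my_conv_alt
  dsimp only
  rw [pv_outer_fold theshold
      (fun i j => (List.range mask.length).foldl (fun tmp k =>
        (List.range (mask.headD []).length).foldl (fun tmp l =>
          tmp + ((mask.getD k []).getD l 0) * ((lena.getD (i + k) []).getD (j + l) 0)) tmp) 0)
      _ _ _ (le_refl _)]
  rw [show List.replicate (((lena.headD []).length : Int) - ((mask.headD []).length : Int) + 1).toNat (0 : Int)
      = (List.range (((lena.headD []).length : Int) - ((mask.headD []).length : Int) + 1).toNat).map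
          (fun _ => (0 : Int)) by simp,
    show List.replicate (((lena.length : Int) - (mask.length : Int) + 1).toNat)
        ((List.range ((((lena.headD []).length : Int) - ((mask.headD []).length : Int) + 1).toNat)).map
          (fun _ => (0 : Int)))
      = (List.range (((lena.length : Int) - (mask.length : Int) + 1).toNat)).map
          (fun _ => (List.range ((((lena.headD []).length : Int) - ((mask.headD []).length : Int) + 1).toNat)).map
            (fun _ => (0 : Int))) by simp]
  rw [pv_scatter_outer _ _
      (fun k l i j => ((mask.getD k []).getD l 0) * ((lena.getD (i + k) []).getD (j + l) 0))
      (fun _ _ => (0 : Int)) _ _]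
  simp [List.map_map, Function.comp]

-- ===== VERDICT (by name: the statement is the Claim_ definition above) =====
theorem my_conv_spec : Claim_equal_my_conv := by
  intro lena mask theshold _ _
  unfold Spec_my_conv
  exact pv_ports_eq lena mask theshold
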